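-- pv_equiv track=rewrite | github.com/de-abreu/ime_4 | 03 - Analysis/min.py | dumbMin
-- ===== SOURCE A (Python) =====
-- def dumbMin(numbers, length):
--     j = 0
--
--     for i in range(length - 1):
--         for j in range(i + 1, length):
--             if (numbers[j] < numbers[i]):
--                 break
--             if (j == length - 1):
--                 return numbers[i]
--     return numbers[j]
-- ===== SOURCE B (Python) =====
-- def dumbMin(numbers, length):
--     m = numbers[0]
--     for i in range(1, length):
--         if numbers[i] < m:
--             m = numbers[i]
--     return m
-- ===== Notes on version B (the rewrite author's own statement) =====
-- stated objective: faster
-- what changed: Replaces the quadratic pairwise break/return scan with a single linear pass keeping the running minimum.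
import Mathlib
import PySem

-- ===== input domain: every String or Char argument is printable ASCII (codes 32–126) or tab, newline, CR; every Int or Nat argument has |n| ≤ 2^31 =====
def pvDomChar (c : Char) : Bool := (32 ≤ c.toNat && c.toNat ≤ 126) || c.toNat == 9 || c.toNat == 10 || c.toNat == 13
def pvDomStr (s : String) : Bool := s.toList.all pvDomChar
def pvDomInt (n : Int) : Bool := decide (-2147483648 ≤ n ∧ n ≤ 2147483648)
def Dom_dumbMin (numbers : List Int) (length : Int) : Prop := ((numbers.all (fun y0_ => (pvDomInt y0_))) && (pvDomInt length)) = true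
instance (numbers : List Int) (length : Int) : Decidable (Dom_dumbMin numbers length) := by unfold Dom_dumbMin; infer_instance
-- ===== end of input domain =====

-- B computes the same minimum of the first `length` elements in one linear pass
-- instead of A's quadratic pairwise break/return scan.

-- ===== PORT A =====
-- result of A's inner `for j in range(i+1, length)` loop: early return, break (with j's value), or normal exit (j unchanged)
inductive InnerRes where
  | ret (v : Int)
  | brk (j : Int)
  | done (j : Int)
deriving DecidableEq, Repr

-- `for j in js: if numbers[j] < numbers[i]: break; if j == length-1: return numbers[i]`
def innerA (numbers : List Int) (length : Int) (i : Int) : List Int → Int → InnerRes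
  | [], j => .done j
  | j :: rest, _ =>
    if PySem.List.pyGetD numbers j 0 < PySem.List.pyGetD numbers i 0 then .brk j
    else if j = length - 1 then .ret (PySem.List.pyGetD numbers i 0)
    else innerA numbers length i rest j

-- `for i in is: <inner loop>`, then `return numbers[j]`
def outerA (numbers : List Int) (length : Int) : List Int → Int → Int
  | [], j => PySem.List.pyGetD numbers j 0
  | i :: rest, j =>
    match innerA numbers length i (PySem.List.pyRange (i + 1) length 1) j with
    | .ret v => v
    | .brk j' => outerA numbers length rest j'
    | .done j' => outerA numbers length rest j'

def dumbMin (numbers : List Int) (length : Int) : Int :=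
  outerA numbers length (PySem.List.pyRange 0 (length - 1) 1) 0

-- ===== PORT B =====
-- `m = numbers[0]; for i in range(1, length): if numbers[i] < m: m = numbers[i]; return m`
def loopB (numbers : List Int) : List Int → Int → Int
  | [], m => m
  | i :: rest, m =>
    loopB numbers rest (if PySem.List.pyGetD numbers i 0 < m then PySem.List.pyGetD numbers i 0 else m)

def dumbMin_alt (numbers : List Int) (length : Int) : Int :=
  loopB numbers (PySem.List.pyRange 1 length 1) (PySem.List.pyGetD numbers 0 0)

-- ===== PRECONDITION & SPEC =====
-- Pre_ excludes exactly the inputs where the Python A raises IndexError: the empty list,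
-- and length exceeding the list length (B raises IndexError on exactly the same inputs).
def Pre_dumbMin (numbers : List Int) (length : Int) : Prop :=
  numbers ≠ [] ∧ length ≤ (numbers.length : Int)
instance (numbers : List Int) (length : Int) : Decidable (Pre_dumbMin numbers length) := by
  unfold Pre_dumbMin; infer_instance

def pvWitness_dumbMin : List Int × Int := ([3, 1, 2], 3)

def Spec_dumbMin (numbers : List Int) (length : Int) (out : Int) : Prop := out = dumbMin_alt numbers length
instance (numbers : List Int) (length : Int) (out : Int) : Decidable (Spec_dumbMin numbers length out) := by unfold Spec_dumbMin; infer_instance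

-- ===== CLAIM (what is proved, stated in full; the proofs are below) =====
def Claim_equal_dumbMin : Prop := ∀ (numbers : List Int) (length : Int), Dom_dumbMin numbers length → Pre_dumbMin numbers length → Spec_dumbMin numbers length (dumbMin numbers length)

-- ===== LEMMAS AND PROOFS =====

-- `g numbers k` = numbers[k] (with junk default 0 out of range; both ports read through it)
def gN (numbers : List Int) (k : Int) : Int := PySem.List.pyGetD numbers k 0

-- fold of `min` over indices [s, length)
def FN (numbers : List Int) (length s m : Int) : Int :=
  (PySem.List.pyRange s length 1).foldl (fun m k => min m (gN numbers k)) m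

-- minimum of numbers over indices [s, length) (meaningful for s < length)
def RN (numbers : List Int) (length s : Int) : Int :=
  FN numbers length (s + 1) (gN numbers s)

theorem loopB_eq (numbers : List Int) (js : List Int) (m : Int) :
    loopB numbers js m = js.foldl (fun m k => min m (gN numbers k)) m := by
  induction js generalizing m with
  | nil => rfl
  | cons j rest ih =>
    simp only [loopB, List.foldl, ih, gN]
    congr 1
    rcases lt_or_ge (PySem.List.pyGetD numbers j 0) m with h | h
    · simp [h, le_of_lt h]
    · simp [not_lt.mpr h, h]

theorem FN_nil (numbers : List Int) (length s m : Int) (h : length ≤ s) :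
    FN numbers length s m = m := by
  simp [FN, PySem.List.pyRange_one_eq_nil h]

theorem FN_cons (numbers : List Int) (length s m : Int) (h : s < length) :
    FN numbers length s m = FN numbers length (s + 1) (min m (gN numbers s)) := by
  simp [FN, PySem.List.pyRange_one_cons h]

theorem RN_last' (numbers : List Int) (length s : Int) (h : length ≤ s + 1) :
    RN numbers length s = gN numbers s := by
  rw [RN, FN_nil numbers length _ _ h]

theorem FN_min (numbers : List Int) (length : Int) :
    ∀ s m, s < length → FN numbers length s m = min m (RN numbers length s) := by
  have key : ∀ n : Nat, ∀ s m, (length - s).toNat ≤ n → s < length →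
      FN numbers length s m = min m (RN numbers length s) := by
    intro n
    induction n with
    | zero => intro s m hle hs; omega
    | succ n ih =>
      intro s m hle hs
      rw [FN_cons _ _ _ _ hs]
      rcases lt_or_ge (s + 1) length with h1 | h1
      · have hR : RN numbers length s = min (gN numbers s) (RN numbers length (s + 1)) := by
          rw [RN]; exact ih (s + 1) _ (by omega) h1
        rw [ih (s + 1) _ (by omega) h1, hR, min_assoc]
      · rw [FN_nil _ _ _ _ h1, RN_last' _ _ _ h1]
  intro s m hs
  exact key (length - s).toNat s m le_rfl hs

theorem RN_expand (numbers : List Int) (length s : Int) (h : s + 1 < length) :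
    RN numbers length s = min (gN numbers s) (RN numbers length (s + 1)) := by
  rw [RN, FN_min numbers length (s + 1) _ h]

theorem RN_le (numbers : List Int) (length : Int) :
    ∀ s k, s ≤ k → k < length → RN numbers length s ≤ gN numbers k := by
  have key : ∀ n : Nat, ∀ s k, (length - s).toNat ≤ n → s ≤ k → k < length →
      RN numbers length s ≤ gN numbers k := by
    intro n
    induction n with
    | zero => intro s k hle h1 h2; omega
    | succ n ih =>
      intro s k hle h1 h2
      rcases lt_or_ge (s + 1) length with hs1 | hs1
      · rw [RN_expand _ _ _ hs1]
        rcases eq_or_lt_of_le h1 with rfl | hk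
        · exact min_le_left _ _
        · exact le_trans (min_le_right _ _) (ih (s + 1) k (by omega) (by omega) h2)
      · have : k = s := by omega
        subst this
        rw [RN_last' _ _ _ hs1]
  intro s k h1 h2
  exact key (length - s).toNat s k le_rfl h1 h2

theorem RN_ge (numbers : List Int) (length : Int) :
    ∀ s a, s < length → (∀ k, s ≤ k → k < length → a ≤ gN numbers k) →
      a ≤ RN numbers length s := by
  have key : ∀ n : Nat, ∀ s a, (length - s).toNat ≤ n → s < length →
      (∀ k, s ≤ k → k < length → a ≤ gN numbers k) → a ≤ RN numbers length s := by
    intro n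
    induction n with
    | zero => intro s a hle hs _; omega
    | succ n ih =>
      intro s a hle hs hall
      rcases lt_or_ge (s + 1) length with hs1 | hs1
      · rw [RN_expand _ _ _ hs1]
        exact le_min (hall s le_rfl hs)
          (ih (s + 1) a (by omega) hs1 (fun k hk1 hk2 => hall k (by omega) hk2))
      · rw [RN_last' _ _ _ hs1]
        exact hall s le_rfl hs
  intro s a hs hall
  exact key (length - s).toNat s a le_rfl hs hall

theorem inner_cases (numbers : List Int) (length i : Int) :
    ∀ s j0, s < length →
      (innerA numbers length i (PySem.List.pyRange s length 1) j0 = .ret (gN numbers i) ∧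
        ∀ k, s ≤ k → k < length → gN numbers i ≤ gN numbers k) ∨
      (∃ k0, innerA numbers length i (PySem.List.pyRange s length 1) j0 = .brk k0 ∧
        s ≤ k0 ∧ k0 < length ∧ gN numbers k0 < gN numbers i) := by
  have key : ∀ n : Nat, ∀ s j0, (length - s).toNat ≤ n → s < length →
      (innerA numbers length i (PySem.List.pyRange s length 1) j0 = .ret (gN numbers i) ∧
        ∀ k, s ≤ k → k < length → gN numbers i ≤ gN numbers k) ∨
      (∃ k0, innerA numbers length i (PySem.List.pyRange s length 1) j0 = .brk k0 ∧
        s ≤ k0 ∧ k0 < length ∧ gN numbers k0 < gN numbers i) := by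
    intro n
    induction n with
    | zero => intro s j0 hle hs; omega
    | succ n ih =>
      intro s j0 hle hs
      rw [PySem.List.pyRange_one_cons hs]
      simp only [innerA, gN]
      by_cases hb : PySem.List.pyGetD numbers s 0 < PySem.List.pyGetD numbers i 0
      · rw [if_pos hb]
        exact Or.inr ⟨s, rfl, le_rfl, hs, hb⟩
      · rw [if_neg hb]
        by_cases he : s = length - 1
        · rw [if_pos he]
          refine Or.inl ⟨rfl, fun k hk1 hk2 => ?_⟩
          have : k = s := by omega
          subst this
          exact not_lt.mp hb
        · rw [if_neg he]
          rcases ih (s + 1) s (by omega) (by omega) with ⟨hres, hall⟩ | ⟨k0, hres, hk1, hk2, hk3⟩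
          · refine Or.inl ⟨hres, fun k hk1 hk2 => ?_⟩
            rcases eq_or_lt_of_le hk1 with rfl | hk
            · exact not_lt.mp hb
            · exact hall k (by omega) hk2
          · exact Or.inr ⟨k0, hres, by omega, hk2, hk3⟩
  intro s j0 hs
  exact key (length - s).toNat s j0 le_rfl hs

theorem outer_spec (numbers : List Int) (length : Int) :
    ∀ i j0, 0 ≤ i → i < length →
      RN numbers length i = RN numbers length 0 →
      (i = length - 1 → gN numbers j0 = RN numbers length 0) →
      outerA numbers length (PySem.List.pyRange i (length - 1) 1) j0 = RN numbers length 0 := by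
  have key : ∀ n : Nat, ∀ i j0, (length - 1 - i).toNat ≤ n → 0 ≤ i → i < length →
      RN numbers length i = RN numbers length 0 →
      (i = length - 1 → gN numbers j0 = RN numbers length 0) →
      outerA numbers length (PySem.List.pyRange i (length - 1) 1) j0 = RN numbers length 0 := by
    intro n
    induction n with
    | zero =>
      intro i j0 hle hi0 hi hmin hj
      have hend : length - 1 ≤ i := by omega
      rw [PySem.List.pyRange_one_eq_nil hend]
      exact hj (by omega)
    | succ n ih =>
      intro i j0 hle hi0 hi hmin hj
      by_cases hend : length - 1 ≤ i
      · rw [PySem.List.pyRange_one_eq_nil hend]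
        exact hj (by omega)
      · rw [PySem.List.pyRange_one_cons (by omega : i < length - 1)]
        simp only [outerA]
        rcases inner_cases numbers length i (i + 1) j0 (by omega)
          with ⟨hres, hall⟩ | ⟨k0, hres, hk1, hk2, hk3⟩
        · rw [hres]
          show gN numbers i = RN numbers length 0
          have hRi : RN numbers length i = gN numbers i := by
            rcases lt_or_ge (i + 1) length with h1 | h1
            · rw [RN_expand _ _ _ h1]
              exact min_eq_left (RN_ge numbers length (i + 1) _ h1
                (fun k hk1 hk2 => hall k hk1 hk2))
            · exact RN_last' _ _ _ h1
          rw [← hRi]; exact hmin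
        · rw [hres]
          have hexp := RN_expand numbers length i (by omega)
          have hle2 := RN_le numbers length (i + 1) k0 hk1 hk2
          have hmin' : RN numbers length (i + 1) = RN numbers length 0 := by
            rw [min_eq_right (le_of_lt (lt_of_le_of_lt hle2 hk3))] at hexp
            rw [← hexp]; exact hmin
          refine ih (i + 1) k0 (by omega) (by omega) (by omega) hmin' ?_
          intro h2
          have hk0 : k0 = i + 1 := by omega
          subst hk0
          rw [← hmin', RN_last' _ _ _ (by omega)]
  intro i j0 hi0 hi hmin hj
  exact key (length - 1 - i).toNat i j0 le_rfl hi0 hi hmin hj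

-- ===== VERDICT (by name: the statement is the Claim_ definition above) =====
theorem dumbMin_spec : Claim_equal_dumbMin := by
  intro numbers length _ _
  unfold Spec_dumbMin dumbMin dumbMin_alt
  rw [loopB_eq]
  rcases le_or_gt length 1 with hl | hl
  · rw [PySem.List.pyRange_one_eq_nil (by omega : length - 1 ≤ 0),
        PySem.List.pyRange_one_eq_nil (by omega : length ≤ 1)]
    rfl
  · have hA := outer_spec numbers length 0 0 le_rfl (by omega) rfl (by omega)
    rw [hA]
    show RN numbers length 0 = FN numbers length 1 (gN numbers 0)
    rfl
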